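-- pv_equiv track=rewrite | github.com/plasticny/online-judge | Problem Set Volumes/p129/129.py | solve
-- ===== SOURCE A (Python) =====
-- from math import floor
-- from typing import Union
--
-- def get_invalid (seq : list[int], left : int, right : int) -> Union[int, None]:
--   while right < -1 and seq[left] == seq[right]:
--     left += 1
--     right += 1
--   return seq[left] if right == -1 else None
--
-- def solve (n : int, l : int) -> list[int]:
--   seq : list[int] = []
--   mat : list[list[bool]] = [] # mark valid letters
--   re_search : bool = False
--   k : int = 0 # store the number of hard seq found
--
--   while k < n:
--     idx = len(seq) - 1
--
--     if not re_search:
--       mat.append([False] * l)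
--       seq.append(0)
--       idx += 1
--
--       invalid_set : set[int] = set()
--       for j in range(floor(len(seq) / 2)):
--         right = -1 * (j + 1)
--         invalid : Union[int, None] = get_invalid(seq, 2 * right, right)
--         if invalid is None:
--           continue
--         mat[idx][invalid] = True
--
--         invalid_set.add(invalid)
--         if len(invalid_set) == l:
--           break
--
--     while seq[idx] < l:
--       if mat[idx][seq[idx]] == False:
--         mat[idx][seq[idx]] = True
--         break
--       seq[idx] += 1
--
--     if seq[idx] < l:
--       k += 1
--       re_search = False
--     else:
--       mat.pop()
--       seq.pop()
--       re_search = True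
--
--   return seq
-- ===== SOURCE B (Python) =====
-- def solve(n: int, l: int) -> list[int]:
--     # Backtracking with no memo matrix: keep only the sequence, the next
--     # candidate letter, and the count of hard sequences seen so far.
--     def is_hard(s: list[int]) -> bool:
--         # no suffix of s is a square (two equal adjacent halves)
--         m = 1
--         while 2 * m <= len(s):
--             if s[-2 * m:-m] == s[-m:]:
--                 return False
--             m += 1
--         return True
--
--     seq: list[int] = []
--     cand: int = 0
--     k: int = 0
--     while k < n:
--         while cand < l and not is_hard(seq + [cand]):
--             cand += 1
--         if cand < l:
--             seq.append(cand)
--             k += 1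
--             cand = 0
--         else:
--             cand = seq.pop() + 1
--     return seq
-- ===== Notes on version B (the rewrite author's own statement) =====
-- stated objective: simpler
-- what changed: Replaced A's memoized valid-letter matrix (mat), re_search flag, placeholder-0 trick and the get_invalid index-walk helper by a two-variable backtracking loop that keeps only the sequence and the next candidate letter, re-deriving validity of a candidate directly by comparing the two halves of each suffix with slices.
import Mathlib
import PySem

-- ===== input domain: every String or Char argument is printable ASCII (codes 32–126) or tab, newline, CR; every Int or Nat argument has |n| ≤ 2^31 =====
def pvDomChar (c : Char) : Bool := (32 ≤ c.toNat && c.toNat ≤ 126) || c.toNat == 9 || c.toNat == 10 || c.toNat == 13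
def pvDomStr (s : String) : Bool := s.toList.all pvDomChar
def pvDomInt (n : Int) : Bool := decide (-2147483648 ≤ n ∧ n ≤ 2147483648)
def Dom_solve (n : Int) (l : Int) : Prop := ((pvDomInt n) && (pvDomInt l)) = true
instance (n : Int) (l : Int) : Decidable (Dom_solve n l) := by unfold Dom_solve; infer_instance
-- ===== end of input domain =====

-- B rewrites A's backtracking machine without the memo matrix `mat`, the `re_search`
-- flag, the placeholder-0 trick and the `get_invalid` pointer walk: it keeps only the
-- sequence and the next candidate letter, re-deriving validity by slice comparison
-- (objective: simpler, not faster).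

-- ===== PORT A =====
-- get_invalid: the while loop walks left/right up; fueled by the distance of `right` to -1.
-- The `none` rows for out-of-range indices mirror Python's IndexError (unreachable in A's calls,
-- whose indices are always in range).
def getInvalid (seq : List Int) (left right : Int) : Option Int :=
  if h : right < -1 then
    match PySem.List.pyGet? seq left, PySem.List.pyGet? seq right with
    | some a, some b =>
        if a = b then getInvalid seq (left + 1) (right + 1) else none
    | _, _ => none
  else if right = -1 then PySem.List.pyGet? seq left
  else none
termination_by ((-1) - right).toNat
decreasing_by omega

-- the `for j in range(...)` loop building the fresh mat row, with the invalid_set and its break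
def rowLoop (l : Int) (seq : List Int) : List Int → List Bool → PySem.Set Int → List Bool
  | [], row, _ => row
  | j :: js, row, s =>
    let right : Int := -1 * (j + 1)
    match getInvalid seq (2 * right) right with
    | none => rowLoop l seq js row s
    | some inv =>
        let row' := PySem.List.pySetD row inv true   -- mat[idx][invalid] = True (always in range)
        let s' := PySem.Set.add s inv
        if PySem.Set.len s' = l then row' else rowLoop l seq js row' s'

-- the inner `while seq[idx] < l` scan: returns the final seq[idx] and the updated mat row
def scanA (l : Int) (row : List Bool) (v : Int) : Int × List Bool :=
  if h : v < l then
    if PySem.List.pyGetD row v false = false then (v, PySem.List.pySetD row v true)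
    else scanA l row (v + 1)
  else (v, row)
termination_by (l - v).toNat
decreasing_by omega

-- the outer `while k < n` loop; one fuel unit per iteration; `none` = fuel exhausted or
-- Python's IndexError on seq[-1] with empty seq (outside Pre_solve)
def loopA (n l : Int) : Nat → List Int → List (List Bool) → Bool → Int → Option (List Int)
  | 0, _, _, _, _ => none
  | fuel + 1, seq, mat, re, k =>
    if k < n then
      if re = false then
        let seq' := seq ++ [0]
        let row0 := rowLoop l seq'
          (PySem.List.pyRange 0 (PySem.Int.floordiv (PySem.List.len seq') 2) 1)
          (List.replicate l.toNat false) PySem.Set.empty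
        let p := scanA l row0 0
        if p.1 < l then loopA n l fuel (seq ++ [p.1]) (mat ++ [p.2]) false (k + 1)
        else loopA n l fuel seq mat true k
      else
        match seq.getLast? with
        | none => none
        | some v0 =>
          let p := scanA l ((mat.getLast?).getD []) v0
          if p.1 < l then loopA n l fuel (seq.dropLast ++ [p.1]) (mat.dropLast ++ [p.2]) false (k + 1)
          else loopA n l fuel seq.dropLast mat.dropLast true k
    else some seq

def solve (n : Int) (l : Int) : List Int :=
  (loopA n l (4 * n.toNat + 4) [] [] false 0).getD []

-- ===== PORT B =====
-- is_hard: the `while 2*m <= len(s)` loop comparing the two halves of each suffix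
def isHardGo (s : List Int) (m : Int) : Bool :=
  if h : 2 * m ≤ PySem.List.len s then
    if PySem.List.slice s (some (-(2 * m))) (some (-m)) = PySem.List.slice s (some (-m)) none
    then false
    else isHardGo s (m + 1)
  else true
termination_by (PySem.List.len s + 2 - 2 * m).toNat
decreasing_by simp [PySem.List.len] at *; omega

def isHard (s : List Int) : Bool := isHardGo s 1

-- the inner `while cand < l and not is_hard(seq + [cand])` scan
def scanB (l : Int) (seq : List Int) (c : Int) : Int :=
  if h : c < l then
    if isHard (seq ++ [c]) then c else scanB l seq (c + 1)
  else c
termination_by (l - c).toNat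
decreasing_by omega

-- the outer `while k < n` loop; `none` = fuel exhausted or Python's IndexError on [].pop()
def loopB (n l : Int) : Nat → List Int → Int → Int → Option (List Int)
  | 0, _, _, _ => none
  | fuel + 1, seq, cand, k =>
    if k < n then
      let c := scanB l seq cand
      if c < l then loopB n l fuel (seq ++ [c]) 0 (k + 1)
      else
        match seq.getLast? with
        | none => none
        | some v => loopB n l fuel seq.dropLast (v + 1) k
    else some seq

def solve_alt (n : Int) (l : Int) : List Int :=
  (loopB n l (4 * n.toNat + 4) [] 0 0).getD []

-- ===== PRECONDITION & SPEC =====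
-- Pre_solve excludes exactly the inputs on which A raises IndexError (the DFS tree over l
-- letters is exhausted before the n-th hard sequence exists: l ≤ 0, or l = 1 with n ≥ 2,
-- or l = 2 with n ≥ 7); B raises the same IndexError there.
def Pre_solve (n : Int) (l : Int) : Prop :=
  n ≤ 0 ∨ 3 ≤ l ∨ (l = 1 ∧ n ≤ 1) ∨ (l = 2 ∧ n ≤ 6)
instance (n : Int) (l : Int) : Decidable (Pre_solve n l) := by unfold Pre_solve; infer_instance
def pvWitness_solve : Int × Int := (5, 3)

def Spec_solve (n : Int) (l : Int) (out : List Int) : Prop := out = solve_alt n l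
instance (n : Int) (l : Int) (out : List Int) : Decidable (Spec_solve n l out) := by unfold Spec_solve; infer_instance

-- ===== CLAIM (what is proved, stated in full; the proofs are below) =====
def Claim_equal_solve : Prop := ∀ (n : Int) (l : Int), Dom_solve n l → Pre_solve n l → Spec_solve n l (solve n l)

-- ===== LEMMAS AND PROOFS =====

-- The machine invariant tying A's memo matrix to B's recomputed validity:
-- row i marks letter c exactly when c was already tried (c <= seq[i]) or appending c to the
-- first i letters would close a square (not isHard).
def InvAB (l : Int) (seq : List Int) (mat : List (List Bool)) : Prop :=
  mat.length = seq.length ∧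
  ∀ i : Nat, (hi : i < seq.length) → (him : i < mat.length) →
    0 ≤ seq[i] ∧ seq[i] < l ∧ isHard (seq.take (i + 1)) = true ∧
    (mat[i]).length = l.toNat ∧
    (∀ c : Int, 0 ≤ c → c < l →
      PySem.List.pyGetD (mat[i]) c false
        = (decide (c ≤ seq[i]) || !(isHard (seq.take i ++ [c]))))

theorem inv_nil (l : Int) : InvAB l [] [] := by
  constructor <;> simp

-- A's loop in re_search mode with an empty sequence: Python's seq[-1] IndexError, port = none
theorem loopA_nil_true (n l : Int) (fuel : Nat) (mat : List (List Bool)) (k : Int) (hk : k < n) :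
    loopA n l fuel [] mat true k = none := by
  cases fuel <;> simp [loopA, hk]


-- the two halves of the suffix of length 2m of p++[·], excluding the final slot, as lists over p
abbrev halfEq (p : List Int) (m : Nat) : Prop :=
  (p.drop (p.length + 1 - 2*m)).take (m-1) = p.drop (p.length + 1 - m)

-- the walk of get_invalid, parametrized by the number j of comparisons already done
theorem getInvalid_walk (s : List Int) (m : Nat) (hm : 1 ≤ m) (hlen : 2*m ≤ s.length) :
    ∀ d : Nat, ∀ j : Nat, j + d = m - 1 →
    getInvalid s (-(2*m:Int) + j) (-(m:Int) + j) =
      (if (s.drop (s.length - 2*m + j)).take d = (s.drop (s.length - m + j)).take d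
       then some (s[s.length - m - 1]'(by omega)) else none) := by
  intro d
  induction d with
  | zero =>
    intro j hj
    have hj' : j = m - 1 := by omega
    subst hj'
    have hr : (-(m:Int) + (m-1:Nat)) = -1 := by push_cast [hm]; ring_nf
    rw [getInvalid]
    simp only [hr]
    norm_num
    have hl : (-(2*m:Int) + (m-1:Nat)) = -((m+1 : Nat) : Int) := by push_cast [hm]; ring_nf
    rw [hl, PySem.List.pyGet?_neg_natCast _ _ (by omega) (by omega)]
    have : s.length - (m+1) = s.length - m - 1 := by omega
    rw [this]
    simp [List.getElem?_eq_getElem (by omega : s.length - m - 1 < s.length)]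
  | succ d ih =>
    intro j hj
    have hjm : j < m - 1 := by omega
    have hr : (-(m:Int) + j) = -((m - j : Nat) : Int) := by push_cast [show j ≤ m by omega]; ring
    have hl : (-(2*m:Int) + j) = -((2*m - j : Nat) : Int) := by push_cast [show j ≤ 2*m by omega]; ring
    rw [getInvalid]
    have hcond : (-(m:Int) + j) < -1 := by omega
    rw [dif_pos hcond]
    rw [hl, hr, PySem.List.pyGet?_neg_natCast _ _ (by omega) (by omega),
        PySem.List.pyGet?_neg_natCast _ _ (by omega) (by omega)]
    have e1 : s.length - (2*m - j) = s.length - 2*m + j := by omega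
    have e2 : s.length - (m - j) = s.length - m + j := by omega
    rw [e1, e2,
        List.getElem?_eq_getElem (by omega : s.length - 2*m + j < s.length),
        List.getElem?_eq_getElem (by omega : s.length - m + j < s.length)]
    simp only [Option.some.injEq]
    have harg1 : (-((2*m - j : Nat):Int) + 1) = (-(2*m:Int) + ((j+1:Nat):Int)) := by
      push_cast [show j ≤ 2*m by omega]; ring
    have harg2 : (-((m - j : Nat):Int) + 1) = (-(m:Int) + ((j+1:Nat):Int)) := by
      push_cast [show j ≤ m by omega]; ring
    have hd1 : s.drop (s.length - 2*m + j) = s[s.length - 2*m + j]'(by omega) :: s.drop (s.length - 2*m + (j+1)) := by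
      rw [List.drop_eq_getElem_cons (by omega)]
      rw [show s.length - 2*m + j + 1 = s.length - 2*m + (j+1) by omega]
    have hd2 : s.drop (s.length - m + j) = s[s.length - m + j]'(by omega) :: s.drop (s.length - m + (j+1)) := by
      rw [List.drop_eq_getElem_cons (by omega)]
      rw [show s.length - m + j + 1 = s.length - m + (j+1) by omega]
    split
    · rename_i heq
      rw [harg1, harg2, ih (j+1) (by omega)]
      rw [hd1, hd2]
      simp [List.take_succ_cons, heq]
    · rename_i hne
      rw [hd1, hd2]
      simp only [List.take_succ_cons]
      rw [if_neg]
      intro hcontra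
      simp at hcontra
      exact hne (by rw [hcontra.1])
theorem getInvalid_char (p : List Int) (x : Int) (M : Nat) (h1 : 1 ≤ M) (h2 : 2*M ≤ p.length + 1) :
    getInvalid (p ++ [x]) (-(2*(M:Int))) (-(M:Int)) =
      if halfEq p M then p[p.length - M]? else none := by
  have hw := getInvalid_walk (p ++ [x]) M h1 (by simp; try omega) (M-1) 0 (by omega)
  have e0 : (-(2*(M:Int)) + (0:Nat)) = -(2*(M:Int)) := by push_cast; ring
  have e1 : (-((M:Int)) + (0:Nat)) = -((M:Int)) := by push_cast; ring
  rw [e0, e1] at hw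
  rw [show -(2*(M:Int)) = -((2*M : Nat) : Int) by push_cast; ring] at hw ⊢
  rw [hw]
  have L := p.length
  have hds : (p ++ [x]).drop ((p ++ [x]).length - 2*M + 0) = p.drop (p.length + 1 - 2*M) ++ [x] := by
    rw [show (p ++ [x]).length - 2*M + 0 = p.length + 1 - 2*M by simp]
    rw [List.drop_append_of_le_length (by omega)]
  have hds2 : (p ++ [x]).drop ((p ++ [x]).length - M + 0) = p.drop (p.length + 1 - M) ++ [x] := by
    rw [show (p ++ [x]).length - M + 0 = p.length + 1 - M by simp]
    rw [List.drop_append_of_le_length (by omega)]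
  have ht1 : (p.drop (p.length + 1 - 2*M) ++ [x]).take (M-1) = (p.drop (p.length + 1 - 2*M)).take (M-1) := by
    rw [List.take_append_of_le_length (by simp; try omega)]
  have ht2 : (p.drop (p.length + 1 - M) ++ [x]).take (M-1) = p.drop (p.length + 1 - M) := by
    rw [List.take_append_of_le_length (by simp; try omega), List.take_of_length_le (by simp; try omega)]
  rw [hds, hds2, ht1, ht2]
  have hgl : (p ++ [x])[(p ++ [x]).length - M - 1]'(by simp; try omega) = p[p.length - M]'(by omega) := by
    have hidx : (p ++ [x]).length - M - 1 = p.length - M := by simp; omega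
    simp only [hidx]
    rw [List.getElem_append_left (by omega)]
  unfold halfEq
  split
  · rw [hgl, List.getElem?_eq_getElem (by omega)]
  · rfl

def sqAtP (p : List Int) (c : Int) (M : Nat) : Prop :=
  1 ≤ M ∧ 2*M ≤ p.length + 1 ∧ halfEq p M ∧ p[p.length - M]? = some c

theorem sq_iff (p : List Int) (c : Int) (M : Nat) (h1 : 1 ≤ M) (h2 : 2*M ≤ p.length + 1) :
    (PySem.List.slice (p ++ [c]) (some (-(2*(M:Int)))) (some (-(M:Int)))
      = PySem.List.slice (p ++ [c]) (some (-(M:Int))) none)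
    ↔ (halfEq p M ∧ p[p.length - M]? = some c) := by
  have hL : (p ++ [c]).length = p.length + 1 := by simp
  have hgen : ∀ (xs : List Int) (j k : Nat), 0 < k → k ≤ j →
      PySem.List.slice xs (some (-(j:Int))) (some (-(k:Int)))
        = (xs.drop (xs.length - j)).take ((xs.length - k) - (xs.length - j)) := by
    intro xs j k hk hkj
    simp [PySem.List.slice, PySem.List.clampIdx_neg_natCast, hk, Nat.lt_of_lt_of_le hk hkj]
  have hs1 : PySem.List.slice (p ++ [c]) (some (-(2*(M:Int)))) (some (-(M:Int)))
      = ((p ++ [c]).drop (p.length + 1 - 2*M)).take M := by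
    rw [show -(2*(M:Int)) = -((2*M : Nat) : Int) by push_cast; ring,
        hgen (p ++ [c]) (2*M) M (by omega) (by omega), hL]
    rw [show p.length + 1 - M - (p.length + 1 - 2*M) = M by omega]
  have hs2 : PySem.List.slice (p ++ [c]) (some (-(M:Int))) none
      = p.drop (p.length + 1 - M) ++ [c] := by
    rw [PySem.List.slice_from_neg_natCast _ M (by omega), hL]
    rw [show p.length + 1 - M = p.length - (M - 1) by omega]
    rw [show p.length - (M-1) = p.length + 1 - M by omega,
        List.drop_append_of_le_length (by omega)]
  rw [hs1, hs2]
  have hd : (p ++ [c]).drop (p.length + 1 - 2*M) = p.drop (p.length + 1 - 2*M) ++ [c] := by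
    rw [List.drop_append_of_le_length (by omega)]
  rw [hd]
  have hlen1 : (p.drop (p.length + 1 - 2*M)).length = 2*M - 1 := by simp; omega
  have ht : (p.drop (p.length + 1 - 2*M) ++ [c]).take M
      = (p.drop (p.length + 1 - 2*M)).take (M-1) ++ [p[p.length - M]'(by omega)] := by
    rw [List.take_append_of_le_length (by omega)]
    have hts : (p.drop (p.length + 1 - 2*M)).take ((M-1)+1)
        = (p.drop (p.length + 1 - 2*M)).take (M-1) ++ ((p.drop (p.length + 1 - 2*M))[M-1]?).toList :=
      List.take_succ
    rw [show (M-1)+1 = M by omega] at hts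
    rw [hts]
    congr 1
    rw [List.getElem?_drop]
    rw [show p.length + 1 - 2*M + (M-1) = p.length - M by omega,
        List.getElem?_eq_getElem (by omega)]
    simp
  rw [ht]
  constructor
  · intro h
    have := List.append_inj' h (by simp)
    refine ⟨this.1, ?_⟩
    have := this.2; simp at this
    rw [List.getElem?_eq_getElem (by omega)]
    simp [this]
  · rintro ⟨hh, hc⟩
    unfold halfEq at hh
    rw [hh]
    rw [List.getElem?_eq_getElem (by omega)] at hc
    simp at hc
    rw [hc]
theorem isHardGo_false_iff (p : List Int) (c : Int) (m0 : Int) (h0 : 1 ≤ m0) :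
    (isHardGo (p ++ [c]) m0 = false ↔ ∃ M : Nat, m0 ≤ M ∧ sqAtP p c M) := by
  rw [isHardGo]
  simp only [PySem.List.len_eq, List.length_append, List.length_singleton]
  by_cases hle : 2 * m0 ≤ ((p.length + 1 : Nat) : Int)
  · rw [dif_pos (by exact_mod_cast hle)]
    have hM0 : m0 = ((m0.toNat : Nat) : Int) := by omega
    have hsq := sq_iff p c m0.toNat (by omega) (by omega)
    by_cases heq : PySem.List.slice (p ++ [c]) (some (-(2*m0))) (some (-m0))
        = PySem.List.slice (p ++ [c]) (some (-m0)) none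
    · rw [if_pos heq]
      simp only [true_iff]
      refine ⟨m0.toNat, by omega, ?_⟩
      have := hsq.mp (by rw [show -(2*((m0.toNat : Nat):Int)) = -(2*m0) by omega,
        show -((m0.toNat : Nat):Int) = -m0 by omega]; exact heq)
      exact ⟨by omega, by omega, this.1, this.2⟩
    · rw [if_neg heq]
      rw [isHardGo_false_iff p c (m0+1) (by omega)]
      constructor
      · rintro ⟨M, hM1, hM2⟩; exact ⟨M, by omega, hM2⟩
      · rintro ⟨M, hM1, hM2⟩
        refine ⟨M, ?_, hM2⟩
        rcases eq_or_lt_of_le hM1 with hMe | hMl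
        · exfalso
          apply heq
          have := hsq.mpr (by rw [show m0.toNat = M by omega]; exact ⟨hM2.2.2.1, hM2.2.2.2⟩)
          rw [show -(2*((m0.toNat : Nat):Int)) = -(2*m0) by omega,
              show -((m0.toNat : Nat):Int) = -m0 by omega] at this
          exact this
        · omega
  · rw [dif_neg (by exact_mod_cast hle)]
    simp only [Bool.true_eq_false, false_iff]
    rintro ⟨M, hM1, h1M, h2M, _⟩
    omega
termination_by (p.length + 2 - 2*m0).toNat
decreasing_by simp at *; omega

theorem isHard_append_false_iff (p : List Int) (c : Int) :
    (isHard (p ++ [c]) = false) ↔ ∃ M : Nat, sqAtP p c M := by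
  rw [isHard, isHardGo_false_iff p c 1 le_rfl]
  constructor
  · rintro ⟨M, _, hM⟩; exact ⟨M, hM⟩
  · rintro ⟨M, hM⟩; exact ⟨M, by exact_mod_cast hM.1, hM⟩
theorem pyGetD_pySetD_int (xs : List Bool) (i j : Int) (v d : Bool)
    (h0 : 0 ≤ i) (h1 : i < xs.length) (h2 : 0 ≤ j) :
    PySem.List.pyGetD (PySem.List.pySetD xs i v) j d
      = if j = i then v else PySem.List.pyGetD xs j d := by
  have hi : i = ((i.toNat : Nat) : Int) := by omega
  have hj : j = ((j.toNat : Nat) : Int) := by omega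
  rw [hi, hj, PySem.List.pyGetD_pySetD_natCast xs i.toNat j.toNat v d (by omega)]
  split_ifs with a b <;> first | rfl | omega

theorem mem_of_nodup_full (s : List Int) (l : Int) (hn : s.Nodup)
    (hb : ∀ y ∈ s, 0 ≤ y ∧ y < l) (hlen : (s.length : Int) = l) :
    ∀ c : Int, 0 ≤ c → c < l → c ∈ s := by
  intro c h1 h2
  by_contra hc
  have hsub : s.toFinset ⊆ (Finset.Ico (0:Int) l).erase c := by
    intro y hy
    rw [List.mem_toFinset] at hy
    refine Finset.mem_erase.mpr ⟨fun he => hc (he ▸ hy), ?_⟩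
    have := hb y hy
    simp [Finset.mem_Ico]; omega
  have h3 := Finset.card_le_card hsub
  rw [List.toFinset_card_of_nodup hn] at h3
  have h4 : ((Finset.Ico (0:Int) l).erase c).card = (Finset.Ico (0:Int) l).card - 1 :=
    Finset.card_erase_of_mem (by simp [Finset.mem_Ico]; omega)
  rw [h4, Int.card_Ico] at h3
  simp at h3
  omega

theorem rowLoop_length (l : Int) (seq : List Int) :
    ∀ (js : List Int) (row : List Bool) (s : PySem.Set Int),
    (rowLoop l seq js row s).length = row.length := by
  intro js
  induction js with
  | nil => intro row s; rfl
  | cons j js ih =>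
    intro row s
    rw [rowLoop]
    cases getInvalid seq (2*(-1*(j+1))) (-1*(j+1)) with
    | none => exact ih row s
    | some inv =>
      simp only []
      split
      · rw [PySem.List.length_pySetD]
      · rw [ih, PySem.List.length_pySetD]

theorem rowLoop_char (l : Int) (seq : List Int) :
    ∀ (js : List Int) (row : List Bool) (s : PySem.Set Int),
    row.length = l.toNat →
    (∀ y ∈ s, 0 ≤ y ∧ y < l) → s.Nodup →
    (∀ c : Int, 0 ≤ c → c < l → (PySem.List.pyGetD row c false = true ↔ c ∈ s)) →
    (∀ j ∈ js, ∀ y : Int, getInvalid seq (2*(-1*(j+1))) (-1*(j+1)) = some y → 0 ≤ y ∧ y < l) →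
    ∀ c : Int, 0 ≤ c → c < l →
      ((PySem.List.pyGetD (rowLoop l seq js row s) c false = true)
        ↔ (c ∈ s ∨ ∃ j ∈ js, getInvalid seq (2*(-1*(j+1))) (-1*(j+1)) = some c)) := by
  intro js
  induction js with
  | nil =>
    intro row s hrl hb hn hrow hjs c h1 h2
    simp [rowLoop, hrow c h1 h2]
  | cons j js ih =>
    intro row s hrl hb hn hrow hjs c h1 h2
    rw [rowLoop]
    cases hg : getInvalid seq (2*(-1*(j+1))) (-1*(j+1)) with
    | none =>
      rw [ih row s hrl hb hn hrow (fun j' hj' => hjs j' (List.mem_cons_of_mem _ hj')) c h1 h2]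
      constructor
      · rintro (hs | ⟨j', hj', hgj⟩)
        · exact Or.inl hs
        · exact Or.inr ⟨j', List.mem_cons_of_mem _ hj', hgj⟩
      · rintro (hs | ⟨j', hj', hgj⟩)
        · exact Or.inl hs
        · rcases List.mem_cons.mp hj' with rfl | hj''
          · rw [hg] at hgj; cases hgj
          · exact Or.inr ⟨j', hj'', hgj⟩
    | some inv =>
      have hinv := hjs j (List.mem_cons_self) inv hg
      simp only []
      have hrow' : ∀ c' : Int, 0 ≤ c' → c' < l →
          (PySem.List.pyGetD (PySem.List.pySetD row inv true) c' false = true ↔ c' ∈ PySem.Set.add s inv) := by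
        intro c' hc1 hc2
        rw [pyGetD_pySetD_int row inv c' true false (by omega) (by omega) hc1,
            PySem.Set.mem_add _ _ _]
        split_ifs with he
        · simp [he]
        · rw [hrow c' hc1 hc2]
          constructor
          · exact Or.inl
          · rintro (h | h)
            · exact h
            · exact absurd h he
      have hb' : ∀ y ∈ PySem.Set.add s inv, 0 ≤ y ∧ y < l := by
        intro y hy
        rcases (PySem.Set.mem_add _ _ _).mp hy with h | rfl
        · exact hb y h
        · exact hinv
      split
      · rename_i hfull
        -- the break: the set holds all l letters, the row is all-true
        have hmem : ∀ c' : Int, 0 ≤ c' → c' < l → c' ∈ PySem.Set.add s inv := by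
          apply mem_of_nodup_full _ l (PySem.Set.nodup_add _ _ hn) hb'
          simpa [PySem.Set.len] using hfull
        rw [(hrow' c h1 h2).symm.mp (hmem c h1 h2) |> fun h => h]
        constructor
        · intro _
          by_cases hce : c = inv
          · exact Or.inr ⟨j, List.mem_cons_self, hce ▸ hg⟩
          · rcases (PySem.Set.mem_add _ _ _).mp (hmem c h1 h2) with h | h
            · exact Or.inl h
            · exact absurd h hce
        · intro _; rfl
      · rename_i hfull
        rw [ih (PySem.List.pySetD row inv true) (PySem.Set.add s inv)
            (by rw [PySem.List.length_pySetD]; exact hrl) hb' (PySem.Set.nodup_add _ _ hn) hrow'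
            (fun j' hj' => hjs j' (List.mem_cons_of_mem _ hj')) c h1 h2]
        rw [PySem.Set.mem_add _ _ _]
        constructor
        · rintro (hs | ⟨j', hj', hgj⟩)
          · rcases hs with h | rfl
            · exact Or.inl h
            · exact Or.inr ⟨j, List.mem_cons_self, hg⟩
          · exact Or.inr ⟨j', List.mem_cons_of_mem _ hj', hgj⟩
        · rintro (hs | ⟨j', hj', hgj⟩)
          · exact Or.inl (Or.inl hs)
          · rcases List.mem_cons.mp hj' with rfl | hj''
            · rw [hg] at hgj
              exact Or.inl (Or.inr (by cases hgj; rfl))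
            · exact Or.inr ⟨j', hj'', hgj⟩
theorem row_lemma (l : Int) (p : List Int) (x : Int)
    (hp : ∀ a ∈ p, 0 ≤ a ∧ a < l) :
    ∀ c : Int, 0 ≤ c → c < l →
      PySem.List.pyGetD
        (rowLoop l (p ++ [x])
          (PySem.List.pyRange 0 (PySem.Int.floordiv (PySem.List.len (p ++ [x])) 2) 1)
          (List.replicate l.toNat false) PySem.Set.empty) c false
        = !(isHard (p ++ [c])) := by
  intro c h1 h2
  have hbase : ∀ c' : Int, 0 ≤ c' → c' < l →
      (PySem.List.pyGetD (List.replicate l.toNat false) c' false = true ↔ c' ∈ (PySem.Set.empty : PySem.Set Int)) := by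
    intro c' hc1 hc2
    rw [PySem.List.pyGetD_eq_getElem _ false hc1 (by simp; omega)]
    simp [PySem.Set.empty]
  -- each possible invalid letter is an element of p, hence within [0, l)
  have hrange : PySem.Int.floordiv (PySem.List.len (p ++ [x])) 2 = (((p.length + 1)/2 : Nat) : Int) := by
    have : PySem.List.len (p ++ [x]) = ((p.length + 1 : Nat) : Int) := by simp
    rw [this]
    exact_mod_cast PySem.Int.floordiv_natCast (p.length + 1) 2
  have hconv : ∀ j : Int, 0 ≤ j → ∀ y : Int,
      getInvalid (p ++ [x]) (2*(-1*(j+1))) (-1*(j+1)) = some y ↔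
      getInvalid (p ++ [x]) (-(2*((j.toNat + 1 : Nat) : Int))) (-((j.toNat + 1 : Nat) : Int)) = some y := by
    intro j hj y
    rw [show (2*(-1*(j+1))) = -(2*((j.toNat + 1 : Nat) : Int)) by push_cast; omega,
        show (-1*(j+1)) = -((j.toNat + 1 : Nat) : Int) by push_cast; omega]
  have hjs : ∀ j ∈ PySem.List.pyRange 0 (PySem.Int.floordiv (PySem.List.len (p ++ [x])) 2) 1,
      ∀ y : Int, getInvalid (p ++ [x]) (2*(-1*(j+1))) (-1*(j+1)) = some y → 0 ≤ y ∧ y < l := by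
    intro j hj y hy
    rw [hrange] at hj
    have hmem := (PySem.List.mem_pyRange_one).mp hj
    have hj0 : 0 ≤ j := hmem.1
    rw [hconv j hj0 y] at hy
    rw [getInvalid_char p x (j.toNat + 1) (by omega) (by omega)] at hy
    split at hy
    · exact hp y (List.mem_of_getElem? hy)
    · cases hy
  have hchar := rowLoop_char l (p ++ [x]) _ (List.replicate l.toNat false) PySem.Set.empty
    (by simp) (by simp [PySem.Set.empty]) (by simp [PySem.Set.empty]) hbase hjs c h1 h2
  have hiff : (∃ j ∈ PySem.List.pyRange 0 (PySem.Int.floordiv (PySem.List.len (p ++ [x])) 2) 1,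
      getInvalid (p ++ [x]) (2*(-1*(j+1))) (-1*(j+1)) = some c) ↔ isHard (p ++ [c]) = false := by
    rw [isHard_append_false_iff]
    constructor
    · rintro ⟨j, hj, hy⟩
      rw [hrange] at hj
      have hmem := (PySem.List.mem_pyRange_one).mp hj
      rw [hconv j hmem.1 c] at hy
      rw [getInvalid_char p x (j.toNat + 1) (by omega) (by omega)] at hy
      split at hy
      · rename_i hhe
        exact ⟨j.toNat + 1, by omega, by omega, hhe, hy⟩
      · cases hy
    · rintro ⟨M, hM1, hM2, hM3, hM4⟩
      refine ⟨((M - 1 : Nat) : Int), ?_, ?_⟩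
      · rw [hrange, PySem.List.mem_pyRange_one]
        constructor
        · omega
        · omega
      · rw [hconv _ (by omega) c,
            show ((M - 1 : Nat) : Int).toNat + 1 = M by omega,
            getInvalid_char p x M hM1 hM2, if_pos hM3]
        exact hM4
  by_cases hh : isHard (p ++ [c]) = true
  · have hex : ¬ ∃ j ∈ PySem.List.pyRange 0 (PySem.Int.floordiv (PySem.List.len (p ++ [x])) 2) 1,
        getInvalid (p ++ [x]) (2*(-1*(j+1))) (-1*(j+1)) = some c := by
      intro hex
      have := hiff.mp hex
      rw [this] at hh
      cases hh
    have hne : PySem.List.pyGetD (rowLoop l (p ++ [x])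
        (PySem.List.pyRange 0 (PySem.Int.floordiv (PySem.List.len (p ++ [x])) 2) 1)
        (List.replicate l.toNat false) PySem.Set.empty) c false ≠ true := by
      intro hcontra
      rcases hchar.mp hcontra with h | h
      · simp [PySem.Set.empty] at h
      · exact hex h
    rw [hh]
    simpa using hne
  · have hf : isHard (p ++ [c]) = false := by simpa using hh
    have hex := hiff.mpr hf
    rw [hchar.mpr (Or.inr hex), hf]
    rfl


theorem scanB_ge (l : Int) (p : List Int) (v : Int) : v ≤ scanB l p v := by
  unfold scanB
  split
  · split
    · omega
    · have := scanB_ge l p (v+1); omega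
  · omega
termination_by (l - v).toNat
decreasing_by omega

theorem scanB_le (l : Int) (p : List Int) (v : Int) (hv : v ≤ l) : scanB l p v ≤ l := by
  unfold scanB
  split
  · split
    · omega
    · exact scanB_le l p (v+1) (by omega)
  · omega
termination_by (l - v).toNat
decreasing_by omega

theorem scanB_spec (l : Int) (p : List Int) (v : Int) :
    (scanB l p v < l → isHard (p ++ [scanB l p v]) = true) ∧
    (∀ c : Int, v ≤ c → c < scanB l p v → isHard (p ++ [c]) = false) := by
  unfold scanB
  split
  · split
    · rename_i h hh
      constructor
      · intro _; exact hh
      · intro c h1 h2; omega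
    · rename_i h hh
      have ih := scanB_spec l p (v+1)
      refine ⟨ih.1, ?_⟩
      intro c h1 h2
      rcases eq_or_lt_of_le h1 with rfl | h1'
      · simpa using hh
      · exact ih.2 c (by omega) h2
  · rename_i h
    exact ⟨by intro hc; omega, by intro c h1 h2; omega⟩
termination_by (l - v).toNat
decreasing_by omega

theorem scan_transfer (l : Int) (p : List Int) (row : List Bool) (v : Int)
    (hv : 0 ≤ v)
    (H : ∀ c : Int, v ≤ c → c < l →
      PySem.List.pyGetD row c false = !(isHard (p ++ [c]))) :
    scanA l row v = (scanB l p v,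
      if scanB l p v < l then PySem.List.pySetD row (scanB l p v) true else row) := by
  have eB : scanB l p v = if v < l then (if isHard (p ++ [v]) then v else scanB l p (v + 1)) else v := by
    rw [scanB]; split <;> simp_all
  by_cases h : v < l
  · by_cases hh : isHard (p ++ [v]) = true
    · have hB : scanB l p v = v := by rw [eB]; simp [h, hh]
      rw [scanA]
      simp only [h, dif_pos, hB]
      rw [H v le_rfl h, hh]
      simp [h]
    · simp [Bool.not_eq_true] at hh
      have hB : scanB l p v = scanB l p (v + 1) := by rw [eB]; simp [h, hh]
      rw [scanA]
      simp only [h, dif_pos]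
      rw [H v le_rfl h, hh]
      simp only [Bool.not_false, hB]
      exact scan_transfer l p row (v+1) (by omega) (fun c h1 h2 => H c (by omega) h2)
  · have hB : scanB l p v = v := by rw [eB]; simp [h]
    rw [scanA]
    simp [h, hB]
termination_by (l - v).toNat
decreasing_by omega
theorem inv_pop (l : Int) (s : List Int) (v : Int) (m : List (List Bool)) (row : List Bool)
    (h : InvAB l (s ++ [v]) (m ++ [row])) : InvAB l s m := by
  obtain ⟨hlen, hAll⟩ := h
  simp at hlen
  refine ⟨by omega, ?_⟩
  intro i hi him
  have h1 : i < (s ++ [v]).length := by simp; omega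
  have h2 : i < (m ++ [row]).length := by simp; omega
  have := hAll i h1 h2
  rw [List.getElem_append_left hi, List.getElem_append_left him,
      List.take_append_of_le_length (by omega), List.take_append_of_le_length (by omega)] at this
  exact this

theorem inv_push (l : Int) (seq : List Int) (mat : List (List Bool)) (row : List Bool)
    (h : InvAB l seq mat)
    (v0 cstar : Int) (hv0 : 0 ≤ v0)
    (hc : cstar = scanB l seq v0) (hlt : cstar < l)
    (hrow : ∀ c : Int, 0 ≤ c → c < l →
      PySem.List.pyGetD row c false = (decide (c < v0) || !(isHard (seq ++ [c]))))
    (hlen : row.length = l.toNat) :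
    InvAB l (seq ++ [cstar]) (mat ++ [PySem.List.pySetD row cstar true]) := by
  obtain ⟨hml, hAll⟩ := h
  have hge : v0 ≤ cstar := hc ▸ scanB_ge l seq v0
  have h0c : 0 ≤ cstar := le_trans hv0 hge
  have hhard : isHard (seq ++ [cstar]) = true := by
    subst hc; exact (scanB_spec l seq v0).1 hlt
  have hmin : ∀ c : Int, v0 ≤ c → c < cstar → isHard (seq ++ [c]) = false := by
    intro c h1 h2; subst hc; exact (scanB_spec l seq v0).2 c h1 h2
  refine ⟨by simp [hml], ?_⟩
  intro i hi him
  simp at hi him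
  rcases lt_or_eq_of_le hi with hlt' | heq
  · have h1 : i < seq.length := hlt'
    have h2 : i < mat.length := by omega
    have := hAll i h1 h2
    rw [List.getElem_append_left h1, List.getElem_append_left h2,
        List.take_append_of_le_length (by omega), List.take_append_of_le_length (by omega)]
    exact this
  · subst heq
    rw [List.getElem_append_right (le_refl _), List.getElem_append_right (by omega)]
    simp only [Nat.sub_self, hml, List.getElem_singleton]
    refine ⟨h0c, hlt, ?_, ?_, ?_⟩
    · have : (seq ++ [cstar]).take (seq.length + 1) = seq ++ [cstar] := by
        apply List.take_of_length_le; simp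
      rw [this]; exact hhard
    · rw [PySem.List.length_pySetD]; exact hlen
    · intro c hc0 hcl
      have htake : (seq ++ [cstar]).take seq.length = seq := by simp
      rw [htake, pyGetD_pySetD_int row cstar c true false h0c (by omega) hc0]
      by_cases hce : c = cstar
      · simp [hce, hhard]
      · rw [hrow c hc0 hcl]
        by_cases hcv : c < v0
        · have : c ≤ cstar := by omega
          simp [hcv, this]
        · have hcd : ¬ (c < v0) := hcv
          by_cases hcc : c < cstar
          · have := hmin c (by omega) hcc
            simp [hcd, this, show c ≤ cstar by omega]
          · have : ¬ (c ≤ cstar) := by omega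
            simp [hcd, this]
            omega

-- one-step unfoldings of the two loops
theorem loopA_step_false (n l : Int) (fuel : Nat) (seq : List Int) (mat : List (List Bool)) (k : Int)
    (hkn : k < n) :
    loopA n l (fuel + 1) seq mat false k =
      (let row0 := rowLoop l (seq ++ [0])
          (PySem.List.pyRange 0 (PySem.Int.floordiv (PySem.List.len (seq ++ [0])) 2) 1)
          (List.replicate l.toNat false) PySem.Set.empty
       let p := scanA l row0 0
       if p.1 < l then loopA n l fuel (seq ++ [p.1]) (mat ++ [p.2]) false (k + 1)
       else loopA n l fuel seq mat true k) := by
  simp [loopA, hkn]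

theorem loopA_step_true (n l : Int) (fuel : Nat) (s : List Int) (v0 : Int)
    (m' : List (List Bool)) (row : List Bool) (k : Int) (hkn : k < n) :
    loopA n l (fuel + 1) (s ++ [v0]) (m' ++ [row]) true k =
      (let p := scanA l row v0
       if p.1 < l then loopA n l fuel (s ++ [p.1]) (m' ++ [p.2]) false (k + 1)
       else loopA n l fuel s m' true k) := by
  simp [loopA, hkn]

theorem loopB_step (n l : Int) (fuel : Nat) (seq : List Int) (cand k : Int) (hkn : k < n) :
    loopB n l (fuel + 1) seq cand k =
      (let c := scanB l seq cand
       if c < l then loopB n l fuel (seq ++ [c]) 0 (k + 1)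
       else match seq.getLast? with
            | none => none
            | some v => loopB n l fuel seq.dropLast (v + 1) k) := by
  simp [loopB, hkn]

-- the bisimulation: A's machine in extend mode tracks B at (seq, cand 0); in re_search mode,
-- with seq = s ++ [v], it tracks B at (s, cand v+1)
theorem sim (n l : Int) : ∀ (fuel : Nat) (k : Int) (seq : List Int) (mat : List (List Bool)),
    InvAB l seq mat →
    (loopA n l fuel seq mat false k = loopB n l fuel seq 0 k) ∧
    (∀ s v0, seq = s ++ [v0] → k < n → loopA n l fuel seq mat true k = loopB n l fuel s (v0 + 1) k) := by
  intro fuel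
  induction fuel with
  | zero =>
    intro k seq mat _
    exact ⟨rfl, fun s v0 _ _ => rfl⟩
  | succ fuel ih =>
    intro k seq mat hInv
    obtain ⟨hml, hAll⟩ := hInv
    constructor
    · -- extend mode
      by_cases hk : k < n
      · have hp : ∀ a ∈ seq, 0 ≤ a ∧ a < l := by
          intro a ha
          obtain ⟨i, hi, rfl⟩ := List.mem_iff_getElem.mp ha
          have := hAll i hi (by omega)
          exact ⟨this.1, this.2.1⟩
        have hrow0 := row_lemma l seq 0 hp
        have hst := scan_transfer l seq _ 0 le_rfl hrow0
        have hlen0 : (rowLoop l (seq ++ [0])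
            (PySem.List.pyRange 0 (PySem.Int.floordiv (PySem.List.len (seq ++ [0])) 2) 1)
            (List.replicate l.toNat false) PySem.Set.empty).length = l.toNat := by
          rw [rowLoop_length]; simp
        rw [loopA_step_false n l fuel seq mat k hk, loopB_step n l fuel seq 0 k hk]
        simp only [hst]
        by_cases hlt : scanB l seq 0 < l
        · simp only [if_pos hlt]
          have hinv' := inv_push l seq mat _ ⟨hml, hAll⟩ 0 (scanB l seq 0) le_rfl rfl hlt
            (by intro c hc1 hc2
                rw [hrow0 c hc1 hc2]
                simp [show ¬ (c < 0) by omega]) hlen0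
          exact (ih (k+1) _ _ hinv').1
        · simp only [if_neg hlt]
          cases hseq : seq.getLast? with
          | none =>
            have : seq = [] := List.getLast?_eq_none_iff.mp hseq
            subst this
            exact loopA_nil_true n l fuel mat k hk
          | some v0 =>
            have hdec : seq = seq.dropLast ++ [v0] := by
              conv_lhs => rw [← List.dropLast_append_getLast? v0 hseq]
            exact (ih k seq mat ⟨hml, hAll⟩).2 seq.dropLast v0 hdec hk
      · simp only [loopA, loopB, if_neg hk]
    · -- re_search mode
      intro s v0 hseq hkn
      subst hseq
      rcases List.eq_nil_or_concat mat with rfl | ⟨m', row, rfl⟩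
      · simp at hml
      rw [List.concat_eq_append] at *
      have hm'len : m'.length = s.length := by simp at hml; omega
      have htop := hAll s.length (by simp) (by simp [hm'len])
      obtain ⟨hv0a, hv0l, hhard_top, hrowlen, hrowc⟩ := htop
      have e1 : (s ++ [v0])[s.length]'(by simp) = v0 := by simp
      have e2 : (m' ++ [row])[s.length]'(by simp [hm'len]) = row := by
        rw [List.getElem_append_right (by omega)]
        simp [hm'len]
      rw [e1] at hv0a hv0l
      rw [e2] at hrowlen hrowc
      rw [List.take_left] at hrowc
      simp only [e1] at hrowc
      have hstep : scanA l row v0 = scanA l row (v0 + 1) := by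
        rw [scanA, dif_pos hv0l, hrowc v0 hv0a hv0l]
        simp
      have hst := scan_transfer l s row (v0 + 1) (by omega)
        (by intro c hc1 hc2
            rw [hrowc c (by omega) hc2]
            simp [show ¬ (c ≤ v0) by omega])
      rw [loopA_step_true n l fuel s v0 m' row k hkn, loopB_step n l fuel s (v0 + 1) k hkn]
      simp only [hstep, hst]
      by_cases hlt : scanB l s (v0 + 1) < l
      · simp only [if_pos hlt]
        have hpop := inv_pop l s v0 m' row ⟨hml, hAll⟩
        have hinv' := inv_push l s m' row hpop (v0 + 1) (scanB l s (v0 + 1)) (by omega) rfl hlt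
          (by intro c hc1 hc2
              rw [hrowc c hc1 hc2]
              congr 1
              simp [Int.lt_add_one_iff]) hrowlen
        exact (ih (k+1) _ _ hinv').1
      · simp only [if_neg hlt]
        cases hseq2 : s.getLast? with
        | none =>
          have : s = [] := List.getLast?_eq_none_iff.mp hseq2
          subst this
          exact loopA_nil_true n l fuel m' k hkn
        | some w =>
          have hdec : s = s.dropLast ++ [w] := by
            conv_lhs => rw [← List.dropLast_append_getLast? w hseq2]
          exact (ih k s m' (inv_pop l s v0 m' row ⟨hml, hAll⟩)).2 s.dropLast w hdec hkn

-- ===== VERDICT (by name: the statement is the Claim_ definition above) =====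
theorem solve_spec : Claim_equal_solve := by
  intro n l _ _
  unfold Spec_solve solve solve_alt
  rw [(sim n l (4 * n.toNat + 4) 0 [] [] (inv_nil l)).1]
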